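-- pv_equiv track=rewrite | github.com/SuzanneVdw/exercises_programming1 | 06-loops/15-assignment-remove-backspaces/student.py | remove_backspaces
-- ===== SOURCE A (Python) =====
-- def remove_backspaces(string):
--     result = string[0]
--     for i in range(1,len(string)):
--         if string[i-1] == "\\" and string[i] == "b":
--             result = result[0:len(result)-2]
--         else:
--             result += string[i]
--     return result
-- ===== SOURCE B (Python) =====
-- def remove_backspaces(string):
--     stack = []
--     i = 0
--     n = len(string)
--     while i < n:
--         if string[i] == "\\" and i + 1 < n and string[i + 1] == "b":
--             if stack:
--                 stack.pop()
--             i += 2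
--         else:
--             stack.append(string[i])
--             i += 1
--     return "".join(stack)
-- ===== Notes on version B (the rewrite author's own statement) =====
-- stated objective: alternative
-- what changed: A scans index pairs (string[i-1], string[i]) from position 1 and rebuilds the result by string concatenation and re-slicing (result[0:len-2]) on every backspace; B walks the string once with a one-character lookahead, keeps a list used as a stack, pops at most one element per "\b" pair and joins once at the end.
import Mathlib
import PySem

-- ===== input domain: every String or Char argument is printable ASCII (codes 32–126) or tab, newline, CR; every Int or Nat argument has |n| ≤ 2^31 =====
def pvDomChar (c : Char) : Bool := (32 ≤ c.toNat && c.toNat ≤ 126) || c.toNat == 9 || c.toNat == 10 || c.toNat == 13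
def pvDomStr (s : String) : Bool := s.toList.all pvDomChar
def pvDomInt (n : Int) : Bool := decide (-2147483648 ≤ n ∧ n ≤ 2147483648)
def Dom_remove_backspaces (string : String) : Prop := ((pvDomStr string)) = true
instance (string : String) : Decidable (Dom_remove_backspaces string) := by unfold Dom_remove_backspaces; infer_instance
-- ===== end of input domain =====

-- B replaces A's rebuild-by-slicing (result[0:len(result)-2] per "\b") with a single stack pass
-- (pop at most one per "\b" pair, join once); on the empty string A raises IndexError, B returns "".

-- ===== PORT A =====
-- A: result = string[0]; for i in range(1, len): if string[i-1]=='\\' and string[i]=='b':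
--    result = result[0:len(result)-2] else: result += string[i]
def remove_backspaces (string : String) : String :=
  let s := string.toList
  match PySem.List.pyGet? s 0 with
  | none => ""  -- string[0] on the empty string: Python raises IndexError (excluded by Pre_)
  | some c0 =>
    String.mk ((PySem.List.pyRange 1 (s.length : Int) 1).foldl
      (fun result i =>
        if PySem.List.pyGet? s (i - 1) = some '\\' ∧ PySem.List.pyGet? s i = some 'b' then
          PySem.List.slice result (some 0) (some ((result.length : Int) - 2))
        else result ++ (PySem.List.pyGet? s i).toList)  -- i in range, so pyGet? is some: appends string[i]
      [c0])

-- ===== PORT B =====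
-- B's while loop: at s[i]=='\\' with s[i+1]=='b' pop once (if stack: stack.pop()) and i += 2,
-- else push s[i] and i += 1; ported as recursion on the remaining characters.
def pvAltGo : List Char → List Char → List Char
  | stack, [] => stack
  | stack, [c] => stack ++ [c]  -- i + 1 < n fails: push the last character
  | stack, c :: d :: rest =>
    if c = '\\' ∧ d = 'b' then pvAltGo stack.dropLast rest
    else pvAltGo (stack ++ [c]) (d :: rest)

def remove_backspaces_alt (string : String) : String :=
  String.mk (pvAltGo [] string.toList)

-- ===== PRECONDITION & SPEC =====
-- Pre_ excludes only the empty string, on which A's string[0] raises IndexError (B returns "" there).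
def Pre_remove_backspaces (string : String) : Prop := string ≠ ""
instance (string : String) : Decidable (Pre_remove_backspaces string) := by unfold Pre_remove_backspaces; infer_instance
def pvWitness_remove_backspaces : String := "ab\\bc"

def Spec_remove_backspaces (string : String) (out : String) : Prop := out = remove_backspaces_alt string
instance (string : String) (out : String) : Decidable (Spec_remove_backspaces string out) := by unfold Spec_remove_backspaces; infer_instance

-- ===== CLAIM (what is proved, stated in full; the proofs are below) =====
def Claim_equal_remove_backspaces : Prop := ∀ (string : String), Dom_remove_backspaces string → Pre_remove_backspaces string → Spec_remove_backspaces string (remove_backspaces string)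

-- ===== LEMMAS AND PROOFS =====

-- A's loop, rephrased as structural recursion carrying the previous character.
def pvAGo : Char → List Char → List Char → List Char
  | _, acc, [] => acc
  | prev, acc, c :: rest =>
    if prev = '\\' ∧ c = 'b' then pvAGo c (acc.take (acc.length - 2)) rest
    else pvAGo c (acc ++ [c]) rest

-- Python's result[0:len(result)-2] is List.take (len - 2).
theorem pv_slice_take (l : List Char) :
    PySem.List.slice l (some 0) (some ((l.length : Int) - 2)) = l.take (l.length - 2) := by
  simp only [PySem.List.slice, PySem.List.clampIdx]
  split_ifs <;> first
  | omega
  | (simp only [Int.toNat_zero, Nat.zero_min, List.drop_zero, Nat.sub_zero]; congr 1; omega)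

theorem pv_A_fold (s : List Char) (rest : List Char) :
    ∀ (pre : List Char) (prev : Char) (acc : List Char), s = pre ++ prev :: rest →
    (PySem.List.pyRange ((pre.length : Int) + 1) (s.length : Int) 1).foldl
      (fun result i =>
        if PySem.List.pyGet? s (i - 1) = some '\\' ∧ PySem.List.pyGet? s i = some 'b' then
          PySem.List.slice result (some 0) (some ((result.length : Int) - 2))
        else result ++ (PySem.List.pyGet? s i).toList) acc
    = pvAGo prev acc rest := by
  induction rest generalizing s with
  | nil =>
    intro pre prev acc h
    have hlen : (s.length : Int) = (pre.length : Int) + 1 := by subst h; push_cast [List.length_append, List.length_cons, List.length_nil]; ring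
    rw [hlen]
    simp [PySem.List.pyRange, pvAGo]
  | cons c rest ih =>
    intro pre prev acc h
    have hlt : (pre.length : Int) + 1 < (s.length : Int) := by
      subst h; push_cast [List.length_append, List.length_cons]; omega
    rw [PySem.List.pyRange_one_cons hlt, List.foldl_cons]
    have hprev : PySem.List.pyGet? s ((pre.length : Int) + 1 - 1) = some prev := by
      have : ((pre.length : Int) + 1 - 1) = ((pre.length : Nat) : Int) := by ring
      rw [this, PySem.List.pyGet?_natCast]
      subst h
      simp
    have hcur : PySem.List.pyGet? s ((pre.length : Int) + 1) = some c := by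
      have : ((pre.length : Int) + 1) = ((pre.length + 1 : Nat) : Int) := by push_cast; ring
      rw [this, PySem.List.pyGet?_natCast]
      subst h
      rw [List.getElem?_append_right (by omega)]
      simp
    have hnext : s = (pre ++ [prev]) ++ c :: rest := by simp [h]
    by_cases hb : prev = '\\' ∧ c = 'b'
    · rw [if_pos (by rw [hprev, hcur]; exact ⟨by rw [hb.1], by rw [hb.2]⟩)]
      rw [pv_slice_take]
      have := ih s (pre ++ [prev]) c (acc.take (acc.length - 2)) hnext
      rw [show ((pre ++ [prev]).length : Int) + 1 = (pre.length : Int) + 1 + 1 by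
            push_cast [List.length_append, List.length_cons, List.length_nil]; ring] at this
      rw [this]
      simp [pvAGo, hb.1, hb.2]
    · rw [if_neg (by rw [hprev, hcur]; simpa using hb)]
      rw [hcur]
      simp only [Option.toList_some]
      have := ih s (pre ++ [prev]) c (acc ++ [c]) hnext
      rw [show ((pre ++ [prev]).length : Int) + 1 = (pre.length : Int) + 1 + 1 by
            push_cast [List.length_append, List.length_cons, List.length_nil]; ring] at this
      rw [this]
      simp [pvAGo, hb]

theorem pvAltGo_push (acc : List Char) (c : Char) (rest : List Char)
    (h : ¬(c = '\\' ∧ rest.head? = some 'b')) :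
    pvAltGo acc (c :: rest) = pvAltGo (acc ++ [c]) rest := by
  cases rest with
  | nil => simp [pvAltGo]
  | cons d r => rw [pvAltGo, if_neg (by simpa using h)]

theorem pv_aGo_eq_altGo (rest : List Char) :
    ∀ (prev : Char) (acc : List Char), (prev = '\\' → acc.getLast? = some '\\') →
    pvAGo prev acc rest
      = if prev = '\\' then pvAltGo acc.dropLast ('\\' :: rest) else pvAltGo acc rest := by
  induction rest with
  | nil =>
    intro prev acc hside
    by_cases hp : prev = '\\'
    · obtain ⟨l', rfl⟩ := List.getLast?_eq_some_iff.mp (hside hp)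
      simp [pvAGo, pvAltGo, hp]
    · simp [pvAGo, pvAltGo, hp]
  | cons c rest ih =>
    intro prev acc hside
    have hstep : pvAGo c (acc ++ [c]) rest = pvAltGo acc (c :: rest) := by
      have h1 := ih c (acc ++ [c]) (fun hc => by simp [hc])
      rw [List.dropLast_concat] at h1
      by_cases hc : c = '\\'
      · subst hc; rw [h1, if_pos rfl]
      · rw [h1, if_neg hc, pvAltGo_push acc c rest (by simp [hc])]
    by_cases hp : prev = '\\'
    · subst hp
      obtain ⟨l', rfl⟩ := List.getLast?_eq_some_iff.mp (hside rfl)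
      rw [if_pos rfl, List.dropLast_concat]
      by_cases hb : c = 'b'
      · subst hb
        rw [pvAGo, if_pos ⟨rfl, rfl⟩]
        have htake : (l' ++ ['\\']).take ((l' ++ ['\\']).length - 2) = l'.dropLast := by
          rw [List.length_append]
          simp only [List.length_cons, List.length_nil]
          rw [show l'.length + 1 - 2 = l'.length - 1 by omega,
              List.take_append_of_le_length (by omega), ← List.dropLast_eq_take]
        rw [htake]
        have h2 := ih 'b' l'.dropLast (fun hcb => absurd hcb (by decide))
        rw [if_neg (by decide)] at h2
        rw [h2]
        conv_rhs => rw [pvAltGo]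
        simp
      · rw [pvAGo, if_neg (by simp [hb]), hstep]
        conv_rhs => rw [pvAltGo]
        simp [hb]
    · rw [if_neg hp, pvAGo, if_neg (by simp [hp]), hstep]

-- ===== VERDICT (by name: the statement is the Claim_ definition above) =====
theorem remove_backspaces_spec : Claim_equal_remove_backspaces := by
  intro string _ hpre
  unfold Spec_remove_backspaces
  obtain ⟨c0, rest, hs⟩ : ∃ c0 rest, string.toList = c0 :: rest := by
    cases h : string.toList with
    | nil => exact absurd (by rw [← string.toList_inj] at *; simpa using h) hpre
    | cons a l => exact ⟨a, l, rfl⟩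
  have hget : PySem.List.pyGet? string.toList 0 = some c0 := by
    rw [show (0:Int) = ((0:Nat):Int) from rfl, PySem.List.pyGet?_natCast, hs]; rfl
  unfold remove_backspaces remove_backspaces_alt
  simp only [hget]
  have hA := pv_A_fold (c0 :: rest) rest [] c0 [c0] rfl
  simp only [List.length_nil, Nat.cast_zero, zero_add] at hA
  have hB : pvAGo c0 [c0] rest = pvAltGo [] (c0 :: rest) := by
    have h0 := pv_aGo_eq_altGo rest c0 [c0] (fun h => by subst h; rfl)
    by_cases hc : c0 = '\\'
    · subst hc; simpa using h0
    · rw [h0, if_neg hc, pvAltGo_push [] c0 rest (by simp [hc]), List.nil_append]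
  rw [hs, hA, hB]
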